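-- pv_equiv track=rewrite | github.com/elektrokoba/python_fun | main.py | subarraysContainUniqueElems
-- ===== SOURCE A (Python) =====
-- def subarraysContainUniqueElems(array, maxRepetition):
--   array.sort()
--   counter = 1
--   for i in range(1, len(array)):
--     if array[i] == array[i - 1]:
--       counter += 1
--       if counter > maxRepetition:
--         return False
--     else:
--       counter = 1
--   return True
-- ===== SOURCE B (Python) =====
-- def subarraysContainUniqueElems(array, maxRepetition):
--   array.sort()
--   d = max(maxRepetition, 1)
--   for i in range(len(array) - d):
--     if array[i] == array[i + d]:
--       return False
--   return True
-- ===== Notes on version B (the rewrite author's own statement) =====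
-- stated objective: alternative
-- what changed: Replaces A's adjacent-pair scan with a running run-length counter by a fixed-distance scan over the sorted array: a value occurs more than maxRepetition times iff some element equals the element max(maxRepetition,1) positions later, so B keeps no counter state at all.
import Mathlib
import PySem

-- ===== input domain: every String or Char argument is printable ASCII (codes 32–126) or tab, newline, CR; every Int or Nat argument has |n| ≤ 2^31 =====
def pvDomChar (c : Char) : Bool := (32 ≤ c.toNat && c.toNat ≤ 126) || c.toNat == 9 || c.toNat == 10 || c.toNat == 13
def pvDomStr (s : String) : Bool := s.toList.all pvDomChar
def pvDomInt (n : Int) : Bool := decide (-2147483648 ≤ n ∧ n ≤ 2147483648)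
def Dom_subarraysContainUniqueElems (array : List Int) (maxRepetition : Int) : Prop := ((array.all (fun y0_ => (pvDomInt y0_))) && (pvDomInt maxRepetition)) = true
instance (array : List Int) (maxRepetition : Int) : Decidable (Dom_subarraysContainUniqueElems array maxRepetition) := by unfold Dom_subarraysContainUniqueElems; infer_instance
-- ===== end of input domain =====

-- B replaces A's run-length counter over adjacent pairs with a fixed-distance comparison in the
-- sorted array (alternative decomposition, same cost). Both Pythons sort their argument in place;
-- the equivalence proved here is about the return value.

-- ===== PORT A =====
-- A's loop over range(1, len(array)) comparing array[i] with array[i-1], as the obvious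
-- structural recursion over the sorted list carrying the same (prev, counter) state.
def pvLoopA (m : Int) (prev : Int) (counter : Int) : List Int → Bool
  | [] => true
  | x :: rest =>
    if x = prev then
      if counter + 1 > m then false else pvLoopA m x (counter + 1) rest
    else pvLoopA m x 1 rest

-- counter starts at 1 for the first element; the loop runs over the tail.
def pvStartA (m : Int) : List Int → Bool
  | [] => true
  | h :: t => pvLoopA m h 1 t

def subarraysContainUniqueElems (array : List Int) (maxRepetition : Int) : Bool :=
  pvStartA maxRepetition (PySem.List.sorted array (fun x => x) false)

-- ===== PORT B =====
def subarraysContainUniqueElems_alt (array : List Int) (maxRepetition : Int) : Bool :=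
  let ls := PySem.List.sorted array (fun x => x) false
  let d := max maxRepetition 1
  (PySem.List.pyRange 0 ((ls.length : Int) - d) 1).all
    (fun i => !(PySem.List.pyGetD ls i 0 == PySem.List.pyGetD ls (i + d) 0))

-- ===== PRECONDITION & SPEC =====
def Spec_subarraysContainUniqueElems (array : List Int) (maxRepetition : Int) (out : Bool) : Prop := out = subarraysContainUniqueElems_alt array maxRepetition
instance (array : List Int) (maxRepetition : Int) (out : Bool) : Decidable (Spec_subarraysContainUniqueElems array maxRepetition out) := by unfold Spec_subarraysContainUniqueElems; infer_instance

-- ===== CLAIM (what is proved, stated in full; the proofs are below) =====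
def Claim_equal_subarraysContainUniqueElems : Prop := ∀ (array : List Int) (maxRepetition : Int), Dom_subarraysContainUniqueElems array maxRepetition → Spec_subarraysContainUniqueElems array maxRepetition (subarraysContainUniqueElems array maxRepetition)

-- ===== LEMMAS AND PROOFS =====

-- Nat-indexed picture of A's loop: k = remaining allowed equal elements before failure.
def pvLoopN (d : Nat) (prev : Int) (k : Nat) : List Int → Bool
  | [] => true
  | x :: rest =>
    if x = prev then
      match k with
      | 0 => false
      | k' + 1 => pvLoopN d prev k' rest
    else pvLoopN d x (d - 1) rest

lemma pvLoopN_cons_eq_zero (d : Nat) (x : Int) (rest : List Int) :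
    pvLoopN d x 0 (x :: rest) = false := by simp [pvLoopN]

lemma pvLoopN_cons_eq_succ (d : Nat) (x : Int) (k : Nat) (rest : List Int) :
    pvLoopN d x (k + 1) (x :: rest) = pvLoopN d x k rest := by simp [pvLoopN]

lemma pvLoopN_cons_ne (d : Nat) (prev x : Int) (k : Nat) (rest : List Int) (hx : x ≠ prev) :
    pvLoopN d prev k (x :: rest) = pvLoopN d x (d - 1) rest := by simp [pvLoopN, hx]

lemma pvLoopA_eq_loopN_nonpos (m : Int) (hm : m ≤ 0) :
    ∀ (rest : List Int) (prev c : Int), 1 ≤ c → pvLoopA m prev c rest = pvLoopN 1 prev 0 rest := by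
  intro rest
  induction rest with
  | nil => intro prev c _; rfl
  | cons x rest ih =>
    intro prev c hc
    simp only [pvLoopA, pvLoopN]
    by_cases hx : x = prev
    · simp [hx, show c + 1 > m by omega]
    · simp [hx, ih x 1 le_rfl]

lemma pvLoopA_eq_loopN_pos (m : Int) (hm : 1 ≤ m) :
    ∀ (rest : List Int) (prev : Int) (c : Nat), 1 ≤ c → (c : Int) ≤ m →
      pvLoopA m prev (c : Int) rest = pvLoopN m.toNat prev (m.toNat - c) rest := by
  intro rest
  induction rest with
  | nil => intro prev c _ _; rfl
  | cons x rest ih =>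
    intro prev c hc hcm
    by_cases hx : x = prev
    · subst hx
      by_cases hover : (c : Int) + 1 > m
      · have hk : m.toNat - c = 0 := by omega
        rw [hk, pvLoopN_cons_eq_zero]
        simp [pvLoopA, hover]
      · have hk : m.toNat - c = (m.toNat - (c + 1)) + 1 := by omega
        rw [hk, pvLoopN_cons_eq_succ]
        have := ih x (c + 1) (by omega) (by push_cast; omega)
        push_cast at this
        simp [pvLoopA, hover, this]
    · rw [pvLoopN_cons_ne _ prev x _ rest hx]
      have := ih x 1 le_rfl (by omega)
      push_cast at this
      simp [pvLoopA, hx, this]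

-- Reshaping an "equal elements d apart" witness across a cons.
lemma pvConsPair_iff (x : Int) (rest : List Int) (d : Nat) (hd : 1 ≤ d) :
    (∃ i, i + d < (x :: rest).length ∧ (x :: rest)[i]? = (x :: rest)[i + d]?) ↔
      (rest[d - 1]? = some x ∨ ∃ i, i + d < rest.length ∧ rest[i]? = rest[i + d]?) := by
  constructor
  · rintro ⟨i, hi, he⟩
    cases i with
    | zero =>
      left
      have hd' : 0 + d = (d - 1) + 1 := by omega
      rw [hd'] at he
      simp only [List.getElem?_cons_succ, List.getElem?_cons_zero] at he
      exact he.symm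
    | succ i =>
      right
      refine ⟨i, by simp at hi; omega, ?_⟩
      have : i + 1 + d = (i + d) + 1 := by omega
      rw [this] at he
      simpa using he
  · rintro (he | ⟨i, hi, he⟩)
    · refine ⟨0, ?_, ?_⟩
      · have : d - 1 < rest.length := (List.getElem?_eq_some_iff.mp he).1
        simp; omega
      · have hd' : 0 + d = (d - 1) + 1 := by omega
        rw [hd']
        simpa using he.symm
    · refine ⟨i + 1, by simp; omega, ?_⟩
      have : i + 1 + d = (i + d) + 1 := by omega
      rw [this]
      simpa using he

-- In a sorted list, elements between two equal ones are equal.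
lemma pvSorted_getElem_eq (rest : List Int) (hs : rest.Pairwise (· ≤ ·)) (x : Int)
    (hge : ∀ y ∈ rest, x ≤ y) {j k : Nat} (hjk : j ≤ k) (hk : k < rest.length)
    (hke : rest[k]? = some x) : rest[j]? = some x := by
  have hj : j < rest.length := lt_of_le_of_lt hjk hk
  have hkv : rest[k] = x := by
    have := List.getElem?_eq_getElem hk
    rw [this] at hke; exact Option.some.inj hke
  have h1 : rest[j] ≤ rest[k] := by
    rcases Nat.lt_or_ge j k with h | h
    · exact List.pairwise_iff_getElem.mp hs j k hj hk h
    · have : j = k := by omega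
      subst this; exact le_rfl
  have h2 : x ≤ rest[j] := hge _ (List.getElem_mem hj)
  rw [List.getElem?_eq_getElem hj]
  exact congrArg some (le_antisymm (hkv ▸ h1) h2)

-- Characterisation of A's loop on a sorted list.
lemma pvLoopN_false_iff (d : Nat) (hd : 1 ≤ d) :
    ∀ (rest : List Int) (prev : Int) (k : Nat), k + 1 ≤ d →
      (prev :: rest).Pairwise (· ≤ ·) →
      (pvLoopN d prev k rest = false ↔
        (rest[k]? = some prev ∨ ∃ i, i + d < rest.length ∧ rest[i]? = rest[i + d]?)) := by
  intro rest
  induction rest with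
  | nil =>
    intro prev k _ _
    simp [pvLoopN]
  | cons x rest ih =>
    intro prev k hk hs
    have hpx : prev ≤ x := (List.pairwise_cons.mp hs).1 x (by simp)
    have hs2 : (x :: rest).Pairwise (· ≤ ·) := (List.pairwise_cons.mp hs).2
    have hge : ∀ y ∈ rest, x ≤ y := fun y hy => (List.pairwise_cons.mp hs2).1 y hy
    by_cases hx : x = prev
    · subst hx
      cases k with
      | zero =>
        rw [pvLoopN_cons_eq_zero]
        simp
      | succ k' =>
        rw [pvLoopN_cons_eq_succ, ih x k' (by omega) hs2,
          pvConsPair_iff x rest d hd]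
        constructor
        · rintro (he | hp)
          · exact Or.inl (by simpa using he)
          · exact Or.inr (Or.inr hp)
        · rintro (he | he | hp)
          · left; simpa using he
          · -- rest[d-1] = x with x sorted below rest forces rest[k'] = x
            left
            have hlen : d - 1 < rest.length := (List.getElem?_eq_some_iff.mp he).1
            exact pvSorted_getElem_eq rest (List.pairwise_cons.mp hs2).2 x hge
              (by omega) hlen he
          · right; exact hp
    · rw [pvLoopN_cons_ne d prev x _ rest hx, ih x (d - 1) (by omega) hs2,
        pvConsPair_iff x rest d hd]
      have hlt : prev < x := lt_of_le_of_ne hpx (fun h => hx h.symm)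
      constructor
      · rintro (he | hp)
        · exact Or.inr (Or.inl he)
        · exact Or.inr (Or.inr hp)
      · rintro (he | hp)
        · -- (x :: rest)[k]? = some prev is impossible: every element is ≥ x > prev
          exfalso
          cases k with
          | zero =>
            simp only [List.getElem?_cons_zero] at he
            exact hx (Option.some.inj he)
          | succ k'' =>
            simp only [List.getElem?_cons_succ] at he
            have hmem : prev ∈ rest := List.mem_of_getElem? he
            exact absurd (hge prev hmem) (by omega)
        · exact hp

lemma pvAltFalse_iff (ls : List Int) (d : Nat) (hd : 1 ≤ d) :
    ((PySem.List.pyRange 0 ((ls.length : Int) - d) 1).all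
      (fun i => !(PySem.List.pyGetD ls i 0 == PySem.List.pyGetD ls (i + d) 0)) = false) ↔
      ∃ i, i + d < ls.length ∧ ls[i]? = ls[i + d]? := by
  have hall : ((PySem.List.pyRange 0 ((ls.length : Int) - d) 1).all
      (fun i => !(PySem.List.pyGetD ls i 0 == PySem.List.pyGetD ls (i + d) 0)) = true) ↔
      ∀ k : Nat, k + d < ls.length → ¬ (ls[k]? = ls[k + d]?) := by
    rw [PySem.List.pyRange_one, List.all_eq_true]
    constructor
    · intro h k hkd
      have hkr : k < (((ls.length : Int) - d) - 0).toNat := by omega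
      have hx := h _ (List.mem_map.mpr ⟨k, List.mem_range.mpr hkr, rfl⟩)
      have e1 : (0 : Int) + (k : Nat) = ((k : Nat) : Int) := by omega
      have e2 : (0 : Int) + (k : Nat) + (d : Nat) = (((k + d : Nat)) : Int) := by push_cast; ring
      rw [e1, PySem.List.pyGetD_natCast] at hx
      rw [show (((k : Nat) : Int) + (d : Nat)) = (((k + d : Nat)) : Int) by push_cast; ring,
        PySem.List.pyGetD_natCast] at hx
      rw [List.getD_eq_getElem ls 0 (show k < ls.length by omega),
        List.getD_eq_getElem ls 0 hkd] at hx
      rw [List.getElem?_eq_getElem (show k < ls.length by omega), List.getElem?_eq_getElem hkd]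
      intro hc
      simp only [Bool.not_eq_eq_eq_not, Bool.not_true, beq_eq_false_iff_ne, ne_eq] at hx
      exact hx (Option.some.inj hc)
    · intro h x hx
      rcases List.mem_map.mp hx with ⟨k, hk, rfl⟩
      have hkd : k + d < ls.length := by
        have := List.mem_range.mp hk
        omega
      rw [show ((0 : Int) + (k : Nat)) = ((k : Nat) : Int) by omega, PySem.List.pyGetD_natCast]
      rw [show (((k : Nat) : Int) + (d : Nat)) = (((k + d : Nat)) : Int) by push_cast; ring,
        PySem.List.pyGetD_natCast]
      rw [List.getD_eq_getElem ls 0 (show k < ls.length by omega),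
        List.getD_eq_getElem ls 0 hkd]
      have := h k hkd
      rw [List.getElem?_eq_getElem (show k < ls.length by omega),
        List.getElem?_eq_getElem hkd] at this
      simp only [Bool.not_eq_eq_eq_not, Bool.not_true, beq_eq_false_iff_ne, ne_eq]
      exact fun hc => this (congrArg some hc)
  rw [Bool.eq_false_iff, Ne, hall]
  simp only [not_forall, not_not]
  constructor
  · rintro ⟨k, hkd, he⟩; exact ⟨k, hkd, he⟩
  · rintro ⟨k, hkd, he⟩; exact ⟨k, hkd, he⟩

lemma pvStartA_false_iff (m : Int) (d : Nat) (hd : d = (max m 1).toNat) (ls : List Int)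
    (hsort : ls.Pairwise (· ≤ ·)) :
    pvStartA m ls = false ↔ ∃ i, i + d < ls.length ∧ ls[i]? = ls[i + d]? := by
  have hd1 : 1 ≤ d := by omega
  cases ls with
  | nil => simp [pvStartA]
  | cons h t =>
    have hbridge : pvLoopA m h 1 t = pvLoopN d h (d - 1) t := by
      by_cases hm : m ≤ 0
      · have hd' : d = 1 := by omega
        rw [hd']
        exact pvLoopA_eq_loopN_nonpos m hm t h 1 le_rfl
      · have hm1 : (1 : Int) ≤ m := by omega
        have hdm : d = m.toNat := by omega
        have := pvLoopA_eq_loopN_pos m hm1 t h 1 le_rfl (by omega)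
        push_cast at this
        rw [hdm]
        exact this
    show pvLoopA m h 1 t = false ↔ _
    rw [hbridge, pvLoopN_false_iff d hd1 t h (d - 1) (by omega) hsort,
      ← pvConsPair_iff h t d hd1]

-- ===== VERDICT (by name: the statement is the Claim_ definition above) =====
theorem subarraysContainUniqueElems_spec : Claim_equal_subarraysContainUniqueElems := by
  intro array m _
  unfold Spec_subarraysContainUniqueElems subarraysContainUniqueElems subarraysContainUniqueElems_alt
  dsimp only
  set ls := PySem.List.sorted array (fun x => x) false with hls
  have hsort : ls.Pairwise (· ≤ ·) := by
    rw [hls]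
    have := PySem.List.sorted_pairwise array (fun x => x)
    simpa using this
  set d : Nat := (max m 1).toNat with hdN
  have hd1 : 1 ≤ d := by omega
  have hdc : ((d : Nat) : Int) = max m 1 := by omega
  have hB := pvAltFalse_iff ls d hd1
  rw [hdc] at hB
  have hA := pvStartA_false_iff m d hdN ls hsort
  have key := hA.trans hB.symm
  cases hav : pvStartA m ls with
  | false => exact (key.mp hav).symm
  | true =>
    cases hbv : ((PySem.List.pyRange 0 ((ls.length : Int) - max m 1) 1).all
        (fun i => !(PySem.List.pyGetD ls i 0 == PySem.List.pyGetD ls (i + max m 1) 0))) with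
    | true => rfl
    | false => exact absurd (key.mpr hbv) (by simp [hav])
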